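-- pv_equiv track=rewrite | github.com/724thomas/CodingChallenge_Python | baekjoon/17266.py | solution
-- ===== SOURCE A (Python) =====
-- def solution(distance, lights_count, lights_pos):
--     def find_end(radius):
--         start = 0
--         for light in lights_pos:
--             lmin = light - radius
--             lmax = light + radius
--             if lmin <= start:
--                 start = lmax
--             else:
--                 return False
--         if start < distance:
--             return False
--         return True
--
--     left = 0
--     right = distance
--
--     while left < right:
--         mid = (left + right) // 2
--         if find_end(mid):
--             right = mid
--         else:
--             left = mid + 1
--     return left
-- ===== SOURCE B (Python) =====
-- def solution(distance, lights_count, lights_pos):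
--     if distance <= 0:
--         return 0
--     if not lights_pos:
--         return distance
--     need = max(lights_pos[0], distance - lights_pos[-1])
--     for prev, cur in zip(lights_pos, lights_pos[1:]):
--         need = max(need, (cur - prev + 1) // 2)
--     return max(0, min(need, distance))
-- ===== Notes on version B (the rewrite author's own statement) =====
-- stated objective: faster
-- what changed: Replaced the binary search over the radius (re-scanning all lights per probe) by a single closed-form pass: the minimal radius is max(first light, distance - last light, ceil(gap/2) over adjacent lights), clamped to [0, distance].
import Mathlib
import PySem

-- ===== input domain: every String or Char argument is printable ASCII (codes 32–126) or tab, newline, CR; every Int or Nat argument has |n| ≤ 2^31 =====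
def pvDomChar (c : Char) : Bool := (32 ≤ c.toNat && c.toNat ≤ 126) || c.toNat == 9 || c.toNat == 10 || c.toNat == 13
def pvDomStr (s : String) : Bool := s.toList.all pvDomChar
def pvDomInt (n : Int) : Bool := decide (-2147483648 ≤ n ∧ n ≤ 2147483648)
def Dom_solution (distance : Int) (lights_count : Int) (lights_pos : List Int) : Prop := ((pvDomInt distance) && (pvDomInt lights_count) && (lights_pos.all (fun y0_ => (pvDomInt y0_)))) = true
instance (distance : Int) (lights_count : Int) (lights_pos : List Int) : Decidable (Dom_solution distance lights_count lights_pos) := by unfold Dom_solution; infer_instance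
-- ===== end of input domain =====

-- B replaces A's binary search over the radius by a single closed-form pass (asymptotically faster).

-- ===== PORT A =====
-- inner 'find_end(radius)': the for-loop over lights with accumulator 'start'
def findEnd (distance radius : Int) : Int → List Int → Bool
  | start, [] => decide (¬ start < distance)
  | start, light :: rest =>
    if light - radius ≤ start then findEnd distance radius (light + radius) rest
    else false

-- the 'while left < right' binary-search loop
def solLoop (distance : Int) (lights_pos : List Int) (left right : Int) : Int :=
  if h : left < right then
    let mid := PySem.Int.floordiv (left + right) 2
    if findEnd distance mid 0 lights_pos then
      solLoop distance lights_pos left mid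
    else
      solLoop distance lights_pos (mid + 1) right
  else left
  termination_by (right - left).toNat
  decreasing_by
  · have h1 := PySem.Int.floordiv_two_mid_bounds (le_of_lt h)
    have h2 := (PySem.Int.floordiv_lt_iff_lt_mul (a := left + right) (b := 2) (q := right) (by omega)).mpr (by omega)
    omega
  · have h1 := PySem.Int.floordiv_two_mid_bounds (le_of_lt h)
    omega

def solution (distance : Int) (lights_count : Int) (lights_pos : List Int) : Int :=
  solLoop distance lights_pos 0 distance

-- ===== PORT B =====
-- one pass over adjacent pairs, accumulating the needed radius
def gapNeed : Int → List Int → Int → Int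
  | _, [], acc => acc
  | prev, cur :: rest, acc => gapNeed cur rest (max acc (PySem.Int.floordiv (cur - prev + 1) 2))

def solution_alt (distance : Int) (lights_count : Int) (lights_pos : List Int) : Int :=
  if distance ≤ 0 then 0
  else
    match lights_pos with
    | [] => distance
    | l1 :: rest =>
      let lastv := (l1 :: rest).getLast (by simp)
      let need := gapNeed l1 rest (max l1 (distance - lastv))
      max 0 (min need distance)

-- ===== PRECONDITION & SPEC =====
def Spec_solution (distance : Int) (lights_count : Int) (lights_pos : List Int) (out : Int) : Prop := out = solution_alt distance lights_count lights_pos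
instance (distance : Int) (lights_count : Int) (lights_pos : List Int) (out : Int) : Decidable (Spec_solution distance lights_count lights_pos out) := by unfold Spec_solution; infer_instance

-- ===== CLAIM (what is proved, stated in full; the proofs are below) =====
def Claim_equal_solution : Prop := ∀ (distance : Int) (lights_count : Int) (lights_pos : List Int), Dom_solution distance lights_count lights_pos → Spec_solution distance lights_count lights_pos (solution distance lights_count lights_pos)

-- ===== LEMMAS AND PROOFS =====

-- 'all adjacent gaps along prev::rest fit within diameter 2x'
def chainLe : Int → List Int → Int → Prop
  | _, [], _ => True
  | p, c :: rs, x => c - p ≤ 2 * x ∧ chainLe c rs x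

-- ⌈g/2⌉ ≤ r ↔ g ≤ 2r
lemma ceilHalf_le (g r : Int) : PySem.Int.floordiv (g + 1) 2 ≤ r ↔ g ≤ 2 * r := by
  rw [PySem.Int.floordiv_eq_ediv_of_pos (by omega)]
  omega

lemma gapNeed_le (rest : List Int) : ∀ prev acc x : Int,
    gapNeed prev rest acc ≤ x ↔ acc ≤ x ∧ chainLe prev rest x := by
  induction rest with
  | nil => intro prev acc x; simp [gapNeed, chainLe]
  | cons c rs ih =>
    intro prev acc x
    simp only [gapNeed, chainLe, ih c, max_le_iff, ceilHalf_le]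
    tauto

lemma findEnd_chain (d r : Int) (rest : List Int) : ∀ prev : Int,
    (findEnd d r (prev + r) rest = true
      ↔ chainLe prev rest r ∧ d - (prev :: rest).getLast (by simp) ≤ r) := by
  induction rest with
  | nil => intro prev; simp [findEnd, chainLe, List.getLast]; omega
  | cons c rs ih =>
    intro prev
    show (if c - r ≤ prev + r then findEnd d r (c + r) rs else false) = true ↔ _
    have hlast : (prev :: c :: rs).getLast (by simp) = (c :: rs).getLast (by simp) := rfl
    rw [hlast]
    by_cases hc : c - r ≤ prev + r
    · rw [if_pos hc, ih c]
      show _ ↔ (c - prev ≤ 2 * r ∧ chainLe c rs r) ∧ _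
      constructor
      · rintro ⟨h1, h2⟩; exact ⟨⟨by omega, h1⟩, h2⟩
      · rintro ⟨⟨_, h1⟩, h2⟩; exact ⟨h1, h2⟩
    · rw [if_neg hc]
      simp only [Bool.false_eq_true, false_iff]
      rintro ⟨⟨h1, _⟩, _⟩
      omega

-- find_end is exactly the threshold test 'need ≤ r'
lemma findEnd_threshold (d r l1 : Int) (rest : List Int) :
    (findEnd d r 0 (l1 :: rest) = true
      ↔ gapNeed l1 rest (max l1 (d - (l1 :: rest).getLast (by simp))) ≤ r) := by
  show (if l1 - r ≤ 0 then findEnd d r (l1 + r) rest else false) = true ↔ _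
  rw [gapNeed_le, max_le_iff]
  by_cases hc : l1 - r ≤ 0
  · rw [if_pos hc, findEnd_chain d r rest l1]
    constructor
    · rintro ⟨h1, h2⟩; exact ⟨⟨by omega, h2⟩, h1⟩
    · rintro ⟨⟨_, h2⟩, h1⟩; exact ⟨h1, h2⟩
  · rw [if_neg hc]
    simp only [Bool.false_eq_true, false_iff]
    rintro ⟨⟨h1, _⟩, _⟩
    omega

-- the binary-search loop on a threshold predicate clamps the threshold into [left, right]
lemma solLoop_clamp (d : Int) (L : List Int) (t : Int) :
    ∀ n (l r : Int), (r - l).toNat = n → l ≤ r →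
    (∀ m, l ≤ m → m < r → (findEnd d m 0 L = true ↔ t ≤ m)) →
    solLoop d L l r = max l (min r t) := by
  intro n
  induction n using Nat.strong_induction_on with
  | _ n ih =>
    intro l r hn hlr hP
    rw [solLoop]
    by_cases h : l < r
    · rw [dif_pos h]
      have hmid := PySem.Int.floordiv_two_mid_bounds (le_of_lt h)
      have hmidlt : PySem.Int.floordiv (l + r) 2 < r :=
        (PySem.Int.floordiv_lt_iff_lt_mul (a := l + r) (b := 2) (q := r) (by omega)).mpr (by omega)
      set mid := PySem.Int.floordiv (l + r) 2 with hmiddef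
      by_cases hfe : findEnd d mid 0 L = true
      · rw [if_pos hfe]
        have ht : t ≤ mid := (hP mid hmid.1 hmidlt).mp hfe
        rw [ih (mid - l).toNat (by omega) l mid rfl hmid.1
            (fun m hm1 hm2 => hP m hm1 (by omega))]
        omega
      · rw [if_neg hfe]
        have ht : ¬ t ≤ mid := fun hx => hfe ((hP mid hmid.1 hmidlt).mpr hx)
        rw [ih (r - (mid + 1)).toNat (by omega) (mid + 1) r rfl (by omega)
            (fun m hm1 hm2 => hP m (by omega) hm2)]
        omega
    · rw [dif_neg h]
      omega

theorem solution_eq (distance lights_count : Int) (lights_pos : List Int) :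
    solution distance lights_count lights_pos = solution_alt distance lights_count lights_pos := by
  unfold solution solution_alt
  by_cases hd : distance ≤ 0
  · rw [if_pos hd, solLoop, dif_neg (by omega)]
  · rw [if_neg hd]
    cases lights_pos with
    | nil =>
      rw [solLoop_clamp distance [] (distance + 1) _ 0 distance rfl (by omega)
          (fun m hm1 hm2 => by simp [findEnd]; omega)]
      show max 0 (min distance (distance + 1)) = distance
      omega
    | cons l1 rest =>
      rw [solLoop_clamp distance (l1 :: rest)
          (gapNeed l1 rest (max l1 (distance - (l1 :: rest).getLast (by simp))))
          _ 0 distance rfl (by omega)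
          (fun m hm1 hm2 => findEnd_threshold distance m l1 rest)]
      simp only []
      omega

-- ===== VERDICT (by name: the statement is the Claim_ definition above) =====
theorem solution_spec : Claim_equal_solution := by
  intro d c L _
  exact solution_eq d c L
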